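-- pv_equiv track=rewrite | github.com/Tratut/str2 | ft_change_place_word.py | ft_change_place_word
-- ===== SOURCE A (Python) =====
-- def ft_len(st):
--     kol = 0
--     for i in st:
--         kol += 1
--     return kol
--
-- def ft_change_place_word(x):
--     k1 = ''
--     k2 = ''
--     i = 0
--     let = x[i]
--     while let != ' ':
--         k1 += let
--         i += 1
--         let = x[i]
--     for i in range(ft_len(k1) + 1, ft_len(x)):
--         k2 += x[i]
--     return k2 + ' ' + k1
-- ===== SOURCE B (Python) =====
-- def ft_change_place_word(x):
--     parts = x.split(' ', 1)
--     return parts[1] + ' ' + parts[0]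
-- ===== Notes on version B (the rewrite author's own statement) =====
-- stated objective: idiomatic
-- what changed: Replaces the manual index/while character scan plus a range-indexed copy loop (and the ft_len helper) with a single str.split limited to one split at the first space, concatenating the two pieces.
import Mathlib
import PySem

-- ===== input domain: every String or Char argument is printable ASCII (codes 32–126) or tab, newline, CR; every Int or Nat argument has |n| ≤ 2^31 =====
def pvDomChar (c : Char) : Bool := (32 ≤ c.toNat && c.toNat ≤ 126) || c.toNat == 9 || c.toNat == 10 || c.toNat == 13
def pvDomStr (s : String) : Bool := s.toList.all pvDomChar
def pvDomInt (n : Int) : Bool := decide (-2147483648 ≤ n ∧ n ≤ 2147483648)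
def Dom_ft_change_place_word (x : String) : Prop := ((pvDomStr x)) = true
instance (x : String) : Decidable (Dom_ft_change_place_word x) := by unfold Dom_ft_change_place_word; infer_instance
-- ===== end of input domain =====

-- B replaces A's manual index/while scan and range-indexed copy loop with one str.split (maxsplit 1, at the first space) and a
-- concatenation of the two pieces (idiomatic; same exceptions: both raise IndexError when there is no space).


-- ===== PORT A =====
-- helper ft_len: the counting loop, verbatim
def ft_len (st : String) : Int := st.toList.foldl (fun kol _ => kol + 1) 0

-- the while loop 'let = x[i]; while let != ' ': k1 += let; i += 1; let = x[i]' as the obvious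
-- structural recursion over the characters still to be read; none = IndexError (empty / no space)
def pvScanK1 : List Char → Option (List Char)
  | [] => none
  | c :: cs => if c = ' ' then some [] else (pvScanK1 cs).map (c :: ·)

def ft_change_place_word (x : String) : String :=
  match pvScanK1 x.toList with
  | none => ""   -- Python raises IndexError here; such inputs are excluded by Pre_
  | some k1 =>
    -- for i in range(ft_len(k1) + 1, ft_len(x)): k2 += x[i]   (every i is in range, so pyGetD is exact)
    let k2 := (PySem.List.pyRange (ft_len (String.ofList k1) + 1) (ft_len x) 1).foldl
      (fun k2 i => k2 ++ [PySem.List.pyGetD x.toList i ' ']) ([] : List Char)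
    String.ofList (k2 ++ ' ' :: k1)

-- ===== PORT B =====
def ft_change_place_word_alt (x : String) : String :=
  let parts := PySem.Chars.splitOnMax x.toList [' '] 1   -- x.split with a single-space separator, maxsplit 1
  match PySem.List.pyGet? parts 1 with                   -- parts[1]; none = IndexError (no space)
  | none => ""                                           -- excluded by Pre_
  | some p1 => String.ofList (p1 ++ ' ' :: PySem.List.pyGetD parts 0 [])   -- parts[1] + single space + parts[0]

-- ===== PRECONDITION & SPEC =====
-- Pre_ excludes exactly the inputs with no space, on which the Python A (and B) raise IndexError.
def Pre_ft_change_place_word (x : String) : Prop := ' ' ∈ x.toList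
instance (x : String) : Decidable (Pre_ft_change_place_word x) := by unfold Pre_ft_change_place_word; infer_instance
def pvWitness_ft_change_place_word : String := "hello world"

def Spec_ft_change_place_word (x : String) (out : String) : Prop := out = ft_change_place_word_alt x
instance (x : String) (out : String) : Decidable (Spec_ft_change_place_word x out) := by unfold Spec_ft_change_place_word; infer_instance

-- ===== CLAIM (what is proved, stated in full; the proofs are below) =====
def Claim_equal_ft_change_place_word : Prop := ∀ (x : String), Dom_ft_change_place_word x → Pre_ft_change_place_word x → Spec_ft_change_place_word x (ft_change_place_word x)

-- ===== LEMMAS AND PROOFS =====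

theorem pv_foldl_len (cs : List Char) (i : Int) :
    cs.foldl (fun kol _ => kol + 1) i = i + cs.length := by
  induction cs generalizing i with
  | nil => simp
  | cons c cs ih => simp [List.foldl, ih]; ring

theorem pv_scanK1_spec (cs : List Char) (h : ' ' ∈ cs) :
    pvScanK1 cs = some (cs.takeWhile (· ≠ ' ')) := by
  induction cs with
  | nil => cases h
  | cons c cs ih =>
    by_cases hc : c = ' '
    · simp [pvScanK1, hc, List.takeWhile]
    · have hmem : ' ' ∈ cs := by
        rcases List.mem_cons.mp h with h | h
        · exact absurd h.symm hc
        · exact h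
      simp [pvScanK1, hc, List.takeWhile, ih hmem]

-- once maxsplit is exhausted, go returns the remainder as the last piece
theorem pv_go_zero (fuel : Nat) (l cur : List Char) (accs : List (List Char)) :
    PySem.Chars.splitOnMax.go [' '] fuel 0 l cur accs = ((cur.reverse ++ l) :: accs).reverse := by
  cases fuel with
  | zero => rfl
  | succ n => cases l with
    | nil => simp [PySem.Chars.splitOnMax.go]
    | cons c cs => simp [PySem.Chars.splitOnMax.go]

theorem pv_go_one (fuel : Nat) : ∀ (l cur : List Char) (accs : List (List Char)),
    ' ' ∈ l → l.length < fuel →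
    PySem.Chars.splitOnMax.go [' '] fuel 1 l cur accs =
      accs.reverse ++ [cur.reverse ++ l.takeWhile (· ≠ ' '), (l.dropWhile (· ≠ ' ')).tail] := by
  induction fuel with
  | zero => intro l cur accs h hlt; omega
  | succ n ih =>
    intro l cur accs h hlt
    cases l with
    | nil => cases h
    | cons c cs =>
      by_cases hc : c = ' '
      · subst hc
        simp only [PySem.Chars.splitOnMax.go]
        rw [if_neg (by omega)]
        rw [if_pos (by simp [List.isPrefixOf])]
        rw [show (1 - 1 : Nat) = 0 from rfl]
        rw [pv_go_zero]
        simp [List.takeWhile, List.dropWhile]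
      · have hmem : ' ' ∈ cs := by
          rcases List.mem_cons.mp h with h | h
          · exact absurd h.symm hc
          · exact h
        simp only [PySem.Chars.splitOnMax.go]
        rw [if_neg (by omega)]
        rw [if_neg (by simp [List.isPrefixOf]; exact fun he => hc he.symm)]
        rw [ih cs (c :: cur) accs hmem (by simp at hlt ⊢; omega)]
        simp [List.takeWhile, List.dropWhile, hc]

theorem pv_splitOnMax_spec (cs : List Char) (h : ' ' ∈ cs) :
    PySem.Chars.splitOnMax cs [' '] 1 =
      [cs.takeWhile (· ≠ ' '), (cs.dropWhile (· ≠ ' ')).tail] := by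
  unfold PySem.Chars.splitOnMax
  rw [if_neg (by omega)]
  rw [show (1 : Int).toNat = 1 from rfl]
  rw [pv_go_one (cs.length + 1) cs [] [] h (by omega)]
  simp

theorem pv_drop_append (t d : List Char) : (t ++ d).drop (t.length + 1) = d.tail := by
  rw [List.drop_append, show t.length + 1 - t.length = 1 by omega, List.drop_one,
      List.drop_eq_nil_of_le (by omega), List.nil_append]

theorem pv_drop_take (cs : List Char) :
    cs.drop ((cs.takeWhile (· ≠ ' ')).length + 1) = (cs.dropWhile (· ≠ ' ')).tail := by
  have h := pv_drop_append (cs.takeWhile (· ≠ ' ')) (cs.dropWhile (· ≠ ' '))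
  rwa [List.takeWhile_append_dropWhile] at h

-- ===== VERDICT (by name: the statement is the Claim_ definition above) =====
theorem ft_change_place_word_spec : Claim_equal_ft_change_place_word := by
  intro x _ hpre
  unfold Spec_ft_change_place_word ft_change_place_word ft_change_place_word_alt
  rw [pv_scanK1_spec x.toList hpre, pv_splitOnMax_spec x.toList hpre]
  simp only []
  have hlen : ft_len (String.ofList (x.toList.takeWhile (· ≠ ' '))) =
      ((x.toList.takeWhile (· ≠ ' ')).length : Int) := by
    rw [ft_len, String.toList_ofList, pv_foldl_len]; ring
  have hlenx : ft_len x = (x.toList.length : Int) := by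
    rw [ft_len, pv_foldl_len]; ring
  rw [hlen, hlenx]
  have hk2 :
      (PySem.List.pyRange (((x.toList.takeWhile (· ≠ ' ')).length : Int) + 1) ((x.toList.length : Int)) 1).foldl
        (fun k2 i => k2 ++ [PySem.List.pyGetD x.toList i ' ']) ([] : List Char)
        = x.toList.drop ((x.toList.takeWhile (· ≠ ' ')).length + 1) := by
    have h := PySem.List.foldl_pyRange_pyGetD' (xs := x.toList) (d := ' ')
      (f := fun (k2 : List Char) (c : Char) => k2 ++ [c]) (init := ([] : List Char))
      (a := ((x.toList.takeWhile (· ≠ ' ')).length : Int) + 1) (by positivity)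
    rw [h, PySem.List.foldl_append_singleton]
    norm_num
  rw [hk2, pv_drop_take]
  rw [show PySem.List.pyGet? [x.toList.takeWhile (· ≠ ' '), (x.toList.dropWhile (· ≠ ' ')).tail] 1
        = some ((x.toList.dropWhile (· ≠ ' ')).tail) from rfl]
  rfl
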